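-- pv_equiv track=rewrite | github.com/broadinstitute/oncotator | oncotator/utils/gaf_annotation.py | adjust_protein_position_and_alleles
-- ===== SOURCE A (Python) =====
-- import itertools
--
-- def chop(iterable, length=2):
--     return itertools.izip(*(iter(iterable) , ) *length)
--
-- def adjust_protein_position_and_alleles(protein_seq, protein_position_start, protein_position_end, reference_aa, observed_aa):
--     ## Adjust positions and alleles for indels and ONPs when leading or trailing amino acids
--     ## are the same in both the refence and observed, thus not changed in the final mutant protein.
--     ## e.g. L > LK at position 813 should be - > L at position 814
--     if reference_aa == observed_aa: #don't adjust on silent DNPs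
--         return reference_aa, observed_aa, protein_position_start, protein_position_end
--     if reference_aa == '': reference_aa = '-'
--     if observed_aa == '': observed_aa = '-'
--
--
--     adjust_alleles_and_positions, is_reverse = False, False
--     if reference_aa[0] == observed_aa[0] and reference_aa[-1] == observed_aa[-1]:
--         left_adjust_count, right_adjust_count = 0, 0
--         for i, alleles in enumerate(itertools.izip(reference_aa, observed_aa)):
--             if alleles[0] == alleles[1]:
--                 left_adjust_count += 1
--             else:
--                 break
--         for i, alleles in enumerate(itertools.izip(reference_aa[::-1], observed_aa[::-1])):
--             if alleles[0] == alleles[1]: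
--                 right_adjust_count += 1
--             else:
--                 break
--
--         if left_adjust_count > right_adjust_count:
--             adjust_alleles_and_positions = True
--             adjusted_ref_aa, adjusted_obs_aa = list(reference_aa), list(observed_aa)
--         elif right_adjust_count > left_adjust_count:
--             adjust_alleles_and_positions = True
--             is_reverse = True
--             adjusted_ref_aa, adjusted_obs_aa = list(reference_aa[::-1]), list(observed_aa[::-1])
--
--     elif reference_aa[0] == observed_aa[0]:
--         adjust_alleles_and_positions = True
--         adjusted_ref_aa, adjusted_obs_aa = list(reference_aa), list(observed_aa)
--     elif reference_aa[-1] == observed_aa[-1]: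
--         adjust_alleles_and_positions = True
--         is_reverse = True
--         adjusted_ref_aa, adjusted_obs_aa = list(reference_aa[::-1]), list(observed_aa[::-1])
--
--     if adjust_alleles_and_positions:
--         allele_idxs_to_delete = list()
--         for i, alleles in enumerate(itertools.izip(adjusted_ref_aa, adjusted_obs_aa)):
--             if alleles[0] == alleles[1]:
--                 allele_idxs_to_delete.append(i)
--             else:
--                 break
--
--         for idx in allele_idxs_to_delete[::-1]:
--             del(adjusted_ref_aa[idx])
--             del(adjusted_obs_aa[idx])
--
--         if is_reverse:
--             adjusted_ref_aa, adjusted_obs_aa = adjusted_ref_aa[::-1], adjusted_obs_aa[::-1]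
--             adjusted_start = protein_position_start
--             adjusted_end = protein_position_end - len(allele_idxs_to_delete)
--         else:
--             adjusted_start = protein_position_start + len(allele_idxs_to_delete)
--             adjusted_end = protein_position_end
--
--         adjusted_ref_aa, adjusted_obs_aa = ''.join(adjusted_ref_aa), ''.join(adjusted_obs_aa)
--         if adjusted_ref_aa == '': adjusted_ref_aa = '-'
--         if adjusted_obs_aa == '': adjusted_obs_aa = '-'
--         if adjusted_ref_aa == '-': #insertion between codons:
--             adjusted_start, adjusted_end = min(adjusted_start, adjusted_end), max(adjusted_start, adjusted_end)
--             if adjusted_end-adjusted_start != 1: raise Exception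
--
--         reference_aa, observed_aa = adjusted_ref_aa, adjusted_obs_aa
--         protein_position_start, protein_position_end = adjusted_start, adjusted_end
--
--     ## Shift protein postion upstream if adjacent amino acids are the same
--     look_upstream_and_adjust_position = False
--     if reference_aa == '-': #insertion
--         slice = len(observed_aa)
--         pos = protein_position_end
--         q_aa = observed_aa
--         look_upstream_and_adjust_position = True
--     elif observed_aa == '-': #deletion
--         slice = len(reference_aa)
--         pos = protein_position_end + 1
--         q_aa = reference_aa
--         look_upstream_and_adjust_position = True
--     if look_upstream_and_adjust_position:
--         for aa in chop(protein_seq[pos-1:], slice):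
--             if q_aa == ''.join(aa):
--                 protein_position_start += slice
--                 protein_position_end += slice
--             else:
--                 break
--     return reference_aa, observed_aa, protein_position_start, protein_position_end
-- ===== SOURCE B (Python) =====
-- import itertools
--
-- def _flank(a, b):
--     return sum(1 for _ in itertools.takewhile(lambda t: t[0] == t[1], zip(a, b)))
--
-- def adjust_protein_position_and_alleles(protein_seq, protein_position_start, protein_position_end, reference_aa, observed_aa):
--     if reference_aa == observed_aa:
--         return reference_aa, observed_aa, protein_position_start, protein_position_end
--     ref = reference_aa or '-'
--     obs = observed_aa or '-'
--     start, end = protein_position_start, protein_position_end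
--
--     p = _flank(ref, obs)
--     s = _flank(ref[::-1], obs[::-1])
--     head, tail = ref[0] == obs[0], ref[-1] == obs[-1]
--     if (p > s) if (head and tail) else head:
--         cut_lo, cut_hi = p, 0
--     elif (s > p) if (head and tail) else tail:
--         cut_lo, cut_hi = 0, s
--     else:
--         cut_lo, cut_hi = 0, 0
--     if cut_lo or cut_hi:
--         ref = ref[cut_lo:len(ref) - cut_hi] or '-'
--         obs = obs[cut_lo:len(obs) - cut_hi] or '-'
--         start, end = start + cut_lo, end - cut_hi
--         if ref == '-':
--             start, end = min(start, end), max(start, end)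
--
--     if ref == '-':
--         k, pos, q = len(obs), end, obs
--     elif obs == '-':
--         k, pos, q = len(ref), end + 1, ref
--     else:
--         return ref, obs, start, end
--     t = protein_seq[pos - 1:]
--     run = sum(1 for _ in itertools.takewhile(lambda ic: ic[1] == q[ic[0] % k], enumerate(t)))
--     shift = run // k * k
--     return ref, obs, start + shift, end + shift
-- ===== Notes on version B (the rewrite author's own statement) =====
-- stated objective: alternative
-- what changed: B replaces A's reverse/collect-indices/delete-back-to-front trimming with a (cut_lo,cut_hi) offset pair derived from two takewhile flank counts and one slice, and replaces A's chop/izip window-by-window upstream loop with a single character-wise scan against the periodic extension of the allele, whose run length yields the total shift arithmetically as run//k*k.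
import Mathlib
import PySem

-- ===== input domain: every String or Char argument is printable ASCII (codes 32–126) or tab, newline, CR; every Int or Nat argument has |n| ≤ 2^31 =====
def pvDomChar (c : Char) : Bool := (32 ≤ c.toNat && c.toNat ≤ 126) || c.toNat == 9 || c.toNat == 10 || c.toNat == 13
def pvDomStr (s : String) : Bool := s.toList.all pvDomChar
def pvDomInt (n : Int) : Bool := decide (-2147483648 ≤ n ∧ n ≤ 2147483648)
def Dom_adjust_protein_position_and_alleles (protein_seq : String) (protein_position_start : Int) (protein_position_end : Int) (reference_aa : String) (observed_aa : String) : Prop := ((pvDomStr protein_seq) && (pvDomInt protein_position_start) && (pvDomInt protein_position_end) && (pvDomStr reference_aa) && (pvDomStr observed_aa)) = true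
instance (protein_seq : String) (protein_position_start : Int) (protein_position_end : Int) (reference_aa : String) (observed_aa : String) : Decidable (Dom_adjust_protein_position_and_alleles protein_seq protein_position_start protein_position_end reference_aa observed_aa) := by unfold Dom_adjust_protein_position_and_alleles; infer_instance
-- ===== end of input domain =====

-- B trims the shared flank once via a (cut_lo, cut_hi) offset pair computed from two takewhile
-- flank counts, and computes the upstream shift arithmetically as run//k*k from a single
-- character-wise scan against the periodic extension of the allele; objective: alternative
-- (no list deletion, no window-by-window chunk comparison). Python A raises a bare Exception
-- on some inputs (see the comment on Pre_); those are outside Pre_.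

-- ===== PORT A =====
-- the `for i, alleles in enumerate(izip(...))` counting loop (izip = zip truncates at the shorter)
def pvLeftCountA : List Char → List Char → Nat
  | a :: as, b :: bs => if a == b then pvLeftCountA as bs + 1 else 0
  | _, _ => 0

-- the loop building allele_idxs_to_delete
def pvDelIdxsA : List Char → List Char → Nat → List Nat
  | a :: as, b :: bs, i => if a == b then i :: pvDelIdxsA as bs (i + 1) else []
  | _, _, _ => []

-- chop(iterable, length) = izip(*(iter(iterable),)*length): full chunks of size k, partial tail dropped
def pvChopA (l : List Char) (k : Nat) : List (List Char) :=
  if _h : 0 < k ∧ k ≤ l.length then l.take k :: pvChopA (l.drop k) k else []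
termination_by l.length
decreasing_by simp [List.length_drop]; omega

-- the `for aa in chop(...)` loop with break, advancing both positions by slice
def pvUpA : List (List Char) → List Char → Int → Int × Int → Int × Int
  | [], _, _, se => se
  | c :: cs, q, k, (st, en) => if q == c then pvUpA cs q k (st + k, en + k) else (st, en)

-- the flank-trimming block of A (list conversion, index collection, back-to-front deletion,
-- orientation-dependent position arithmetic, insertion min/max). Where Python raises `Exception`
-- (adjusted span ≠ 1, excluded by Pre_) the port continues with the min/max values.
def pvMidA (protein_position_start protein_position_end : Int) (reference_aa observed_aa : String) : String × String × Int × Int :=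
  let ra := if reference_aa == "" then "-" else reference_aa
  let oa := if observed_aa == "" then "-" else observed_aa
  let r := ra.toList
  let o := oa.toList
  let sel : Bool × Bool × List Char × List Char :=
    if r.headD ' ' == o.headD ' ' && r.getLastD ' ' == o.getLastD ' ' then
      let lc := pvLeftCountA r o
      let rc := pvLeftCountA r.reverse o.reverse
      if lc > rc then (true, false, r, o)
      else if rc > lc then (true, true, r.reverse, o.reverse)
      else (false, false, [], [])
    else if r.headD ' ' == o.headD ' ' then (true, false, r, o)
    else if r.getLastD ' ' == o.getLastD ' ' then (true, true, r.reverse, o.reverse)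
    else (false, false, [], [])
  if sel.1 then
    let idxs := pvDelIdxsA sel.2.2.1 sel.2.2.2 0
    let pr := idxs.reverse.foldl (fun pr idx => (pr.1.eraseIdx idx, pr.2.eraseIdx idx)) (sel.2.2.1, sel.2.2.2)
    let trip : List Char × List Char × Int × Int :=
      if sel.2.1 then (pr.1.reverse, pr.2.reverse, protein_position_start, protein_position_end - (idxs.length : Int))
      else (pr.1, pr.2, protein_position_start + (idxs.length : Int), protein_position_end)
    let ras := if trip.1.isEmpty then "-" else String.ofList trip.1
    let oas := if trip.2.1.isEmpty then "-" else String.ofList trip.2.1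
    if ras == "-" then (ras, oas, min trip.2.2.1 trip.2.2.2, max trip.2.2.1 trip.2.2.2)
    else (ras, oas, trip.2.2.1, trip.2.2.2)
  else (ra, oa, protein_position_start, protein_position_end)

-- the upstream-shift block of A (chop the tail slice, walk matching chunks)
def pvTailA (protein_seq : String) (x : String × String × Int × Int) : String × String × Int × Int :=
  if x.1 == "-" then
    let q := x.2.1.toList
    let t := PySem.List.slice protein_seq.toList (some (x.2.2.2 - 1)) none
    let se := pvUpA (pvChopA t q.length) q (q.length : Int) (x.2.2.1, x.2.2.2)
    (x.1, x.2.1, se.1, se.2)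
  else if x.2.1 == "-" then
    let q := x.1.toList
    let t := PySem.List.slice protein_seq.toList (some (x.2.2.2 + 1 - 1)) none
    let se := pvUpA (pvChopA t q.length) q (q.length : Int) (x.2.2.1, x.2.2.2)
    (x.1, x.2.1, se.1, se.2)
  else x

def adjust_protein_position_and_alleles (protein_seq : String) (protein_position_start : Int) (protein_position_end : Int) (reference_aa : String) (observed_aa : String) : String × String × Int × Int :=
  if reference_aa == observed_aa then (reference_aa, observed_aa, protein_position_start, protein_position_end)
  else pvTailA protein_seq (pvMidA protein_position_start protein_position_end reference_aa observed_aa)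

-- ===== PORT B =====
-- _flank: length of takewhile(equal, zip(a, b))
def pvFlankB (a b : List Char) : Nat := ((a.zip b).takeWhile (fun t => t.1 == t.2)).length

-- len(takewhile(lambda ic: ic[1] == q[ic[0] % k], enumerate(t))) written as the iteration it is;
-- q[i % k] is in range whenever 0 < k = len(q), so getD is exact there (B only calls it so)
def pvRunB (q : List Char) (k : Nat) : List Char → Nat → Nat
  | [], _ => 0
  | c :: cs, i => if c == q.getD (i % k) ' ' then pvRunB q k cs (i + 1) + 1 else 0

-- the trimming section of B: flank counts pick a (cut_lo, cut_hi) offset pair, one slice trims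
def pvMidB (protein_position_start protein_position_end : Int) (reference_aa observed_aa : String) : String × String × Int × Int :=
  let r := (if reference_aa == "" then "-" else reference_aa).toList
  let o := (if observed_aa == "" then "-" else observed_aa).toList
  let p := pvFlankB r o
  let s := pvFlankB r.reverse o.reverse
  let head := r.headD ' ' == o.headD ' '
  let tail := r.getLastD ' ' == o.getLastD ' '
  let cut : Nat × Nat :=
    if (if head && tail then decide (p > s) else head) then (p, 0)
    else if (if head && tail then decide (s > p) else tail) then (0, s)
    else (0, 0)
  if cut.1 != 0 || cut.2 != 0 then
    let r2 := PySem.List.slice r (some (cut.1 : Int)) (some ((r.length : Int) - (cut.2 : Int)))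
    let o2 := PySem.List.slice o (some (cut.1 : Int)) (some ((o.length : Int) - (cut.2 : Int)))
    let ra2 := if r2.isEmpty then "-" else String.ofList r2
    let oa2 := if o2.isEmpty then "-" else String.ofList o2
    let st := protein_position_start + (cut.1 : Int)
    let en := protein_position_end - (cut.2 : Int)
    if ra2 == "-" then (ra2, oa2, min st en, max st en) else (ra2, oa2, st, en)
  else (String.ofList r, String.ofList o, protein_position_start, protein_position_end)

-- the upstream-shift section of B: one periodic character scan, shift = run // k * k
def pvTailB (protein_seq : String) (x : String × String × Int × Int) : String × String × Int × Int :=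
  if x.1 == "-" then
    let q := x.2.1.toList
    let t := PySem.List.slice protein_seq.toList (some (x.2.2.2 - 1)) none
    let shift := ((pvRunB q q.length t 0) / q.length * q.length : Nat)
    (x.1, x.2.1, x.2.2.1 + shift, x.2.2.2 + shift)
  else if x.2.1 == "-" then
    let q := x.1.toList
    let t := PySem.List.slice protein_seq.toList (some (x.2.2.2 + 1 - 1)) none
    let shift := ((pvRunB q q.length t 0) / q.length * q.length : Nat)
    (x.1, x.2.1, x.2.2.1 + shift, x.2.2.2 + shift)
  else x

def adjust_protein_position_and_alleles_alt (protein_seq : String) (protein_position_start : Int) (protein_position_end : Int) (reference_aa : String) (observed_aa : String) : String × String × Int × Int :=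
  if reference_aa == observed_aa then (reference_aa, observed_aa, protein_position_start, protein_position_end)
  else pvTailB protein_seq (pvMidB protein_position_start protein_position_end reference_aa observed_aa)

-- ===== PRECONDITION & SPEC =====
-- closed-form shared-prefix length, used only to state Pre_
def pvSharedPfx (a b : List Char) : Nat := ((a.zip b).takeWhile (fun ab => ab.1 == ab.2)).length

-- the exact condition under which Python A executes `raise Exception`: the chosen trim empties the
-- reference allele (or leaves the literal '-') and the adjusted positions do not span exactly 1
def pvRaiseCond (protein_position_start protein_position_end : Int) (reference_aa observed_aa : String) : Prop :=
  let r := (if reference_aa = "" then "-" else reference_aa).toList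
  let o := (if observed_aa = "" then "-" else observed_aa).toList
  let p := pvSharedPfx r o
  let s := pvSharedPfx r.reverse o.reverse
  let head := r.headD ' ' = o.headD ' '
  let tail := r.getLastD ' ' = o.getLastD ' '
  (((head ∧ tail ∧ s < p) ∨ (head ∧ ¬ tail)) ∧ (r.drop p = [] ∨ r.drop p = ['-']) ∧
     (protein_position_end - (protein_position_start + (p : Int))).natAbs ≠ 1) ∨
  (((head ∧ tail ∧ p < s) ∨ (¬ head ∧ tail)) ∧ (r.take (r.length - s) = [] ∨ r.take (r.length - s) = ['-']) ∧
     (protein_position_end - (s : Int) - protein_position_start).natAbs ≠ 1)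

-- Pre_ excludes exactly the inputs on which Python A raises a bare Exception (insertion whose
-- adjusted positions do not span 1); A returns normally on every other input
def Pre_adjust_protein_position_and_alleles (protein_seq : String) (protein_position_start : Int) (protein_position_end : Int) (reference_aa : String) (observed_aa : String) : Prop :=
  reference_aa = observed_aa ∨ ¬ pvRaiseCond protein_position_start protein_position_end reference_aa observed_aa

instance (protein_seq : String) (protein_position_start : Int) (protein_position_end : Int) (reference_aa : String) (observed_aa : String) : Decidable (Pre_adjust_protein_position_and_alleles protein_seq protein_position_start protein_position_end reference_aa observed_aa) := by unfold Pre_adjust_protein_position_and_alleles; unfold pvRaiseCond; infer_instance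

def pvWitness_adjust_protein_position_and_alleles : String × Int × Int × String × String := ("LKLK", 3, 5, "L", "LK")

def Spec_adjust_protein_position_and_alleles (protein_seq : String) (protein_position_start : Int) (protein_position_end : Int) (reference_aa : String) (observed_aa : String) (out : String × String × Int × Int) : Prop := out = adjust_protein_position_and_alleles_alt protein_seq protein_position_start protein_position_end reference_aa observed_aa
instance (protein_seq : String) (protein_position_start : Int) (protein_position_end : Int) (reference_aa : String) (observed_aa : String) (out : String × String × Int × Int) : Decidable (Spec_adjust_protein_position_and_alleles protein_seq protein_position_start protein_position_end reference_aa observed_aa out) := by unfold Spec_adjust_protein_position_and_alleles; infer_instance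

-- ===== CLAIM (what is proved, stated in full; the proofs are below) =====
def Claim_equal_adjust_protein_position_and_alleles : Prop := ∀ (protein_seq : String) (protein_position_start : Int) (protein_position_end : Int) (reference_aa : String) (observed_aa : String), Dom_adjust_protein_position_and_alleles protein_seq protein_position_start protein_position_end reference_aa observed_aa → Pre_adjust_protein_position_and_alleles protein_seq protein_position_start protein_position_end reference_aa observed_aa → Spec_adjust_protein_position_and_alleles protein_seq protein_position_start protein_position_end reference_aa observed_aa (adjust_protein_position_and_alleles protein_seq protein_position_start protein_position_end reference_aa observed_aa)

-- ===== LEMMAS AND PROOFS =====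

theorem pvWitness_ok : Dom_adjust_protein_position_and_alleles (pvWitness_adjust_protein_position_and_alleles.1) (pvWitness_adjust_protein_position_and_alleles.2.1) (pvWitness_adjust_protein_position_and_alleles.2.2.1) (pvWitness_adjust_protein_position_and_alleles.2.2.2.1) (pvWitness_adjust_protein_position_and_alleles.2.2.2.2) ∧ Pre_adjust_protein_position_and_alleles (pvWitness_adjust_protein_position_and_alleles.1) (pvWitness_adjust_protein_position_and_alleles.2.1) (pvWitness_adjust_protein_position_and_alleles.2.2.1) (pvWitness_adjust_protein_position_and_alleles.2.2.2.1) (pvWitness_adjust_protein_position_and_alleles.2.2.2.2) := by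
  decide

theorem LC_cons (x y : Char) (xs ys : List Char) :
    pvLeftCountA (x :: xs) (y :: ys) = if x == y then pvLeftCountA xs ys + 1 else 0 := rfl

theorem leftCount_le_left (a : List Char) : ∀ b : List Char, pvLeftCountA a b ≤ a.length := by
  induction a with
  | nil => intro b; cases b <;> simp [pvLeftCountA]
  | cons x xs ih =>
    intro b
    cases b with
    | nil => simp [pvLeftCountA]
    | cons y ys =>
      rw [LC_cons]
      by_cases h : (x == y) = true
      · rw [if_pos h]; simpa using ih ys
      · rw [if_neg h]; simp

theorem leftCount_le_right (a : List Char) : ∀ b : List Char, pvLeftCountA a b ≤ b.length := by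
  induction a with
  | nil => intro b; cases b <;> simp [pvLeftCountA]
  | cons x xs ih =>
    intro b
    cases b with
    | nil => simp [pvLeftCountA]
    | cons y ys =>
      rw [LC_cons]
      by_cases h : (x == y) = true
      · rw [if_pos h]; simpa using ih ys
      · rw [if_neg h]; simp

-- B's takewhile-over-zip flank count equals A's izip counting loop
theorem flank_eq (a : List Char) : ∀ b : List Char, pvFlankB a b = pvLeftCountA a b := by
  induction a with
  | nil => intro b; cases b <;> simp [pvFlankB, pvLeftCountA]
  | cons x xs ih =>
    intro b
    cases b with
    | nil => simp [pvFlankB, pvLeftCountA]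
    | cons y ys =>
      rw [LC_cons]
      by_cases h : (x == y) = true
      · simp [pvFlankB, List.takeWhile, h, ← ih ys, pvFlankB]
      · simp [pvFlankB, List.takeWhile, h]

-- matching heads give a positive left count
theorem LC_pos (a b : List Char) (ha : a ≠ []) (hb : b ≠ []) (h : a.headD ' ' = b.headD ' ') :
    1 ≤ pvLeftCountA a b := by
  cases a with
  | nil => exact absurd rfl ha
  | cons x xs =>
    cases b with
    | nil => exact absurd rfl hb
    | cons y ys =>
      simp at h
      rw [LC_cons]
      simp [h]

-- A's index-collecting loop yields the contiguous range of the left count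
theorem delIdxs_eq (a : List Char) : ∀ (b : List Char) (i : Nat),
    pvDelIdxsA a b i = List.range' i (pvLeftCountA a b) := by
  induction a with
  | nil => intro b i; cases b <;> rfl
  | cons x xs ih =>
    intro b i
    cases b with
    | nil => rfl
    | cons y ys =>
      rw [LC_cons]
      by_cases h : (x == y) = true
      · rw [if_pos h, List.range'_succ]
        show pvDelIdxsA (x :: xs) (y :: ys) i = _
        rw [pvDelIdxsA, if_pos h, ih]
      · rw [if_neg h]
        show pvDelIdxsA (x :: xs) (y :: ys) i = _
        rw [pvDelIdxsA, if_neg h]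
        rfl

theorem delIdxs_range (a b : List Char) : pvDelIdxsA a b 0 = List.range (pvLeftCountA a b) := by
  rw [delIdxs_eq, List.range_eq_range']

-- a componentwise fold over a pair splits
theorem foldl_pair_split (f g : List Char → Nat → List Char) (xs : List Nat) (a b : List Char) :
    xs.foldl (fun pr i => (f pr.1 i, g pr.2 i)) (a, b) = (xs.foldl f a, xs.foldl g b) := by
  induction xs generalizing a b with
  | nil => rfl
  | cons x xs ih => simpa using ih (f a x) (g b x)

theorem eraseIdx_drop (k : Nat) : ∀ (l : List Char), k < l.length →
    (l.eraseIdx k).drop k = l.drop (k + 1) := by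
  induction k with
  | zero =>
    intro l h
    cases l with
    | nil => simp at h
    | cons x xs => simp [List.eraseIdx]
  | succ n ih =>
    intro l h
    cases l with
    | nil => simp at h
    | cons x xs =>
      rw [List.eraseIdx_cons_succ, List.drop_succ_cons, List.drop_succ_cons]
      exact ih xs (by simpa using h)

-- deleting indices k-1, …, 0 back to front deletes the first k elements
theorem eraseFold (k : Nat) : ∀ (l : List Char), k ≤ l.length →
    ((List.range k).reverse).foldl (fun l i => l.eraseIdx i) l = l.drop k := by
  induction k with
  | zero => intro l _; simp
  | succ n ih =>
    intro l h
    rw [List.range_succ]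
    simp only [List.reverse_append, List.reverse_cons, List.reverse_nil, List.nil_append,
      List.cons_append, List.foldl_cons]
    have hlen : (l.eraseIdx n).length = l.length - 1 := by
      rw [List.length_eraseIdx]
      simp [show n < l.length by omega]
    rw [ih (l.eraseIdx n) (by omega)]
    exact eraseIdx_drop n l (by omega)

theorem foldpair (a b : List Char) (k : Nat) (h1 : k ≤ a.length) (h2 : k ≤ b.length) :
    ((List.range k).reverse).foldl (fun pr idx => (pr.1.eraseIdx idx, pr.2.eraseIdx idx)) (a, b)
      = (a.drop k, b.drop k) := by
  rw [foldl_pair_split, eraseFold _ _ h1, eraseFold _ _ h2]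

-- the run never exceeds the scanned length
theorem run_le (q : List Char) (k : Nat) : ∀ (t : List Char) (i : Nat), pvRunB q k t i ≤ t.length := by
  intro t
  induction t with
  | nil => intro i; simp [pvRunB]
  | cons c cs ih =>
    intro i
    rw [pvRunB]
    by_cases h : (c == q.getD (i % k) ' ') = true
    · rw [if_pos h]; simpa using ih (i + 1)
    · rw [if_neg h]; simp

-- the run depends on the start index only through its residue
theorem run_mod (q : List Char) (k : Nat) : ∀ (t : List Char) (i j : Nat), i % k = j % k →
    pvRunB q k t i = pvRunB q k t j := by
  intro t
  induction t with
  | nil => intro i j _; rfl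
  | cons c cs ih =>
    intro i j h
    have h1 : (i + 1) % k = (j + 1) % k := by
      rw [Nat.add_mod i 1 k, Nat.add_mod j 1 k, h]
    rw [pvRunB, pvRunB, h, ih (i + 1) (j + 1) h1]

-- a full matching chunk advances the run by k
theorem run_chunk (q : List Char) (k : Nat) (hk : 0 < k) (hq : k = q.length)
    (t : List Char) (hle : k ≤ t.length) (htk : t.take k = q) :
    pvRunB q k t 0 = k + pvRunB q k (t.drop k) 0 := by
  have aux : ∀ (u : List Char) (i : Nat), i + u.length = k → q.drop i = u →
      pvRunB q k (u ++ t.drop k) i = u.length + pvRunB q k (t.drop k) k := by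
    intro u
    induction u with
    | nil =>
      intro i hi hd
      have : i = k := by simpa using hi
      subst this
      simp
    | cons c cs ih =>
      intro i hi hd
      have hik : i < k := by simp at hi; omega
      have hgd : q.getD i ' ' = c := by
        have : q[i]? = some c := by
          rw [← List.head?_drop, hd]; rfl
        simp [List.getD, this]
      have hcond : (c == q.getD (i % k) ' ') = true := by
        rw [Nat.mod_eq_of_lt hik, hgd]
        simp
      have hd' : q.drop (i + 1) = cs := by
        have : q.drop (i + 1) = (q.drop i).drop 1 := by
          rw [List.drop_drop]
        rw [this, hd]; rfl
      rw [List.cons_append, pvRunB, if_pos hcond, ih (i + 1) (by simp at hi ⊢; omega) hd']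
      simp; omega
  have hsplit : t = q ++ t.drop k := by
    conv_lhs => rw [← List.take_append_drop k t, htk]
  have h0 := aux q 0 (by simpa using hq.symm) (by simp)
  calc pvRunB q k t 0 = pvRunB q k (q ++ t.drop k) 0 := by rw [← hsplit]
    _ = q.length + pvRunB q k (t.drop k) k := h0
    _ = k + pvRunB q k (t.drop k) 0 := by
        rw [← hq, run_mod q k (t.drop k) k 0 (by simp)]

-- a short or mismatching head keeps the run below k
theorem run_small (q : List Char) (k : Nat) (hk : 0 < k) (hq : k = q.length)
    (t : List Char) (h : t.length < k ∨ t.take k ≠ q) : pvRunB q k t 0 < k := by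
  rcases h with h | h
  · exact lt_of_le_of_lt (run_le q k t 0) h
  · by_cases hlen : t.length < k
    · exact lt_of_le_of_lt (run_le q k t 0) hlen
    · push_neg at hlen
      -- the two length-k lists differ at some index j < k
      have hlt : (t.take k).length = k := by simp; omega
      have hql : q.length = k := hq.symm
      have hex : ∃ j, j < k ∧ (t.take k).getD j ' ' ≠ q.getD j ' ' := by
        by_contra hc
        push_neg at hc
        apply h
        apply List.ext_getElem (by omega)
        intro j hj1 hj2
        have := hc j (by omega)
        rwa [List.getD_eq_getElem _ _ hj1, List.getD_eq_getElem _ _ hj2] at this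
      obtain ⟨j, hjk, hne⟩ := hex
      -- the run stops at or before the first mismatch
      have stop : ∀ (u : List Char) (i j : Nat), j < u.length →
          u.getD j ' ' ≠ q.getD ((i + j) % k) ' ' → pvRunB q k u i ≤ j := by
        intro u
        induction u with
        | nil => intro i j hj _; simp at hj
        | cons c cs ih =>
          intro i j hj hne
          cases j with
          | zero =>
            have : (c == q.getD (i % k) ' ') = false := by
              simp only [beq_eq_false_iff_ne, ne_eq]
              simpa using hne
            rw [pvRunB, this]
            simp
          | succ m =>
            rw [pvRunB]
            by_cases hc : (c == q.getD (i % k) ' ') = true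
            · rw [if_pos hc]
              have : pvRunB q k cs (i + 1) ≤ m := by
                apply ih (i + 1) m (by simpa using hj)
                have : i + 1 + m = i + (m + 1) := by omega
                rw [this]
                simpa using hne
              omega
            · rw [if_neg hc]; omega
      have hgd : t.getD j ' ' = (t.take k).getD j ' ' := by
        rw [List.getD_eq_getElem _ _ (by omega : j < t.length),
            List.getD_eq_getElem _ _ (by omega : j < (t.take k).length)]
        simp
      have : pvRunB q k t 0 ≤ j := by
        apply stop t 0 j (by omega)
        rw [Nat.zero_add, Nat.mod_eq_of_lt hjk, hgd]
        exact hne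
      omega

-- A's chunk walk equals B's arithmetic shift run // k * k
theorem upA_run (q : List Char) (k : Nat) (hk : 0 < k) (hq : k = q.length) :
    ∀ (n : Nat) (t : List Char), t.length ≤ n → ∀ (st en : Int),
      pvUpA (pvChopA t k) q (k : Int) (st, en)
        = (st + ((pvRunB q k t 0) / k * k : Nat), en + ((pvRunB q k t 0) / k * k : Nat)) := by
  intro n
  induction n with
  | zero =>
    intro t ht st en
    have ht0 : t = [] := List.eq_nil_of_length_eq_zero (by omega)
    subst ht0
    rw [pvChopA, dif_neg (by simp; omega)]
    simp [pvUpA, pvRunB, Nat.zero_div]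
  | succ n ih =>
    intro t ht st en
    by_cases hcase : k ≤ t.length ∧ t.take k = q
    · rw [pvChopA, dif_pos ⟨hk, hcase.1⟩]
      have hqeq : (q == t.take k) = true := by simp [hcase.2]
      show (if q == t.take k then pvUpA (pvChopA (t.drop k) k) q (k:Int) (st + k, en + k) else (st, en)) = _
      rw [if_pos hqeq]
      rw [ih (t.drop k) (by simp; omega) (st + k) (en + k)]
      rw [run_chunk q k hk hq t hcase.1 hcase.2]
      have hdiv : (k + pvRunB q k (t.drop k) 0) / k = pvRunB q k (t.drop k) 0 / k + 1 := by
        rw [Nat.add_comm k, Nat.add_div_right _ hk]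
      rw [hdiv]
      simp only [Prod.mk.injEq]
      constructor <;> · push_cast [Nat.add_mul]; ring
    · have hsmall : pvRunB q k t 0 < k := by
        apply run_small q k hk hq
        by_cases hl : t.length < k
        · exact Or.inl hl
        · exact Or.inr (fun hc => hcase ⟨by omega, hc⟩)
      have hz : pvRunB q k t 0 / k = 0 := Nat.div_eq_of_lt hsmall
      by_cases hle : k ≤ t.length
      · have htk : t.take k ≠ q := fun hc => hcase ⟨hle, hc⟩
        rw [pvChopA, dif_pos ⟨hk, hle⟩]
        have hqeq : (q == t.take k) = false := by
          simp only [beq_eq_false_iff_ne, ne_eq]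
          exact fun hc => htk hc.symm
        show (if q == t.take k then pvUpA (pvChopA (t.drop k) k) q (k:Int) (st + k, en + k) else (st, en)) = _
        rw [hqeq]
        simp [hz]
      · rw [pvChopA, dif_neg (by simp; omega)]
        simp [pvUpA, hz]

theorem tailAB (protein_seq : String) (x : String × String × Int × Int) :
    pvTailA protein_seq x = pvTailB protein_seq x := by
  have main : ∀ (q t : List Char) (st en : Int),
      pvUpA (pvChopA t q.length) q (q.length : Int) (st, en)
        = (st + ((pvRunB q q.length t 0) / q.length * q.length : Nat),
           en + ((pvRunB q q.length t 0) / q.length * q.length : Nat)) := by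
    intro q t st en
    by_cases hk : 0 < q.length
    · exact upA_run q q.length hk rfl t.length t le_rfl st en
    · have hq0 : q.length = 0 := by omega
      rw [hq0]
      rw [pvChopA, dif_neg (by omega)]
      simp [pvUpA]
  unfold pvTailA pvTailB
  by_cases h1 : (x.1 == "-") = true
  · rw [if_pos h1, if_pos h1]
    simp only [main]
  · rw [if_neg h1, if_neg h1]
    by_cases h2 : (x.2.1 == "-") = true
    · rw [if_pos h2, if_pos h2]
      simp only [main]
    · rw [if_neg h2, if_neg h2]

-- helpers for midAB
theorem toList_ne_nil (s : String) (h : ¬ s = "") : s.toList ≠ [] := by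
  intro hc
  apply h
  have := congrArg String.ofList hc
  rwa [String.ofList_toList] at this

theorem headD_rev (l : List Char) : l.reverse.headD ' ' = l.getLastD ' ' := by
  cases l with
  | nil => rfl
  | cons x xs =>
    rw [List.headD_eq_head?, List.getLastD_eq_getLast?, List.head?_reverse]

theorem drop_take_full (l : List Char) (n : Nat) : (l.drop n).take (l.length - n) = l.drop n :=
  List.take_of_length_le (by simp)

theorem midAB (ps pe : Int) (ra oa : String) : pvMidA ps pe ra oa = pvMidB ps pe ra oa := by
  unfold pvMidA pvMidB
  simp only [flank_eq]
  set N := if ra == "" then "-" else ra with hN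
  set M := if oa == "" then "-" else oa with hM
  set r := N.toList with hrdef
  set o := M.toList with hodef
  have hNne : ¬ N = "" := by
    rw [hN]; split
    · simp
    · next h => simpa using h
  have hMne : ¬ M = "" := by
    rw [hM]; split
    · simp
    · next h => simpa using h
  have hrne : r ≠ [] := toList_ne_nil N hNne
  have hone : o ≠ [] := toList_ne_nil M hMne
  have hofr : String.ofList r = N := String.ofList_toList
  have hofo : String.ofList o = M := String.ofList_toList
  have hf1 := foldpair r o (pvLeftCountA r o) (leftCount_le_left r o) (leftCount_le_right r o)
  have hf2 := foldpair r.reverse o.reverse (pvLeftCountA r.reverse o.reverse)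
    (leftCount_le_left _ _) (leftCount_le_right _ _)
  have hrc_le_r : pvLeftCountA r.reverse o.reverse ≤ r.length := by
    simpa using leftCount_le_left r.reverse o.reverse
  have hrc_le_o : pvLeftCountA r.reverse o.reverse ≤ o.length := by
    simpa using leftCount_le_right r.reverse o.reverse
  have hrev1 : (r.reverse.drop (pvLeftCountA r.reverse o.reverse)).reverse
      = r.take (r.length - pvLeftCountA r.reverse o.reverse) := by
    rw [List.drop_reverse, List.reverse_reverse]
  have hrev2 : (o.reverse.drop (pvLeftCountA r.reverse o.reverse)).reverse
      = o.take (o.length - pvLeftCountA r.reverse o.reverse) := by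
    rw [List.drop_reverse, List.reverse_reverse]
  have hcast_r : (r.length : Int) - (pvLeftCountA r.reverse o.reverse : Int)
      = ((r.length - pvLeftCountA r.reverse o.reverse : Nat) : Int) := by omega
  have hcast_o : (o.length : Int) - (pvLeftCountA r.reverse o.reverse : Int)
      = ((o.length - pvLeftCountA r.reverse o.reverse : Nat) : Int) := by omega
  have hf1' : (List.range (pvLeftCountA r o)).foldr
      (fun x y => (y.1.eraseIdx x, y.2.eraseIdx x)) (r, o)
      = (r.drop (pvLeftCountA r o), o.drop (pvLeftCountA r o)) := by
    rw [← List.foldl_reverse]; exact hf1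
  have hf2' : (List.range (pvLeftCountA r.reverse o.reverse)).foldr
      (fun x y => (y.1.eraseIdx x, y.2.eraseIdx x)) (r.reverse, o.reverse)
      = (r.reverse.drop (pvLeftCountA r.reverse o.reverse),
         o.reverse.drop (pvLeftCountA r.reverse o.reverse)) := by
    rw [← List.foldl_reverse]; exact hf2
  by_cases hh : (r.headD ' ' == o.headD ' ') = true <;>
    by_cases ht : (r.getLastD ' ' == o.getLastD ' ') = true
  · rcases Nat.lt_trichotomy (pvLeftCountA r o) (pvLeftCountA r.reverse o.reverse) with hlt | heq | hgt
    · have h1 : ¬ pvLeftCountA r o > pvLeftCountA r.reverse o.reverse := by omega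
      have hrc0 : pvLeftCountA r.reverse o.reverse ≠ 0 := by omega
      simp only [hh, ht, Bool.and_self, if_true, h1, hlt, delIdxs_range, hf1, hf2,
        List.length_range, hrev1, hrev2, decide_eq_true_eq, ite_false, ite_true]
      simp [hlt, h1, hrc0, hcast_r, hcast_o, PySem.List.slice_natCast, hrev1, hrev2, hf1', hf2']
    · have h1 : ¬ pvLeftCountA r o > pvLeftCountA r.reverse o.reverse := by omega
      have h2 : ¬ pvLeftCountA r.reverse o.reverse > pvLeftCountA r o := by omega
      simp only [hh, ht, Bool.and_self, if_true, h1, h2, delIdxs_range, hf1, hf2,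
        List.length_range, decide_eq_true_eq, ite_false, ite_true]
      simp [h1, h2, hofr, hofo, hf1', hf2']
    · have h2 : ¬ pvLeftCountA r.reverse o.reverse > pvLeftCountA r o := by omega
      have hlc0 : pvLeftCountA r o ≠ 0 := by omega
      simp only [hh, ht, Bool.and_self, if_true, hgt, h2, delIdxs_range, hf1, hf2,
        List.length_range, decide_eq_true_eq, ite_false, ite_true]
      simp [hgt, h2, hlc0, PySem.List.slice_natCast, drop_take_full, hf1', hf2']
  · have hlc0 : pvLeftCountA r o ≠ 0 := by
      have := LC_pos r o hrne hone (by simpa using hh)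
      omega
    simp only [hh, ht, Bool.and_false, Bool.false_eq_true, if_false, if_true,
      delIdxs_range, hf1, List.length_range]
    simp [hlc0, PySem.List.slice_natCast, drop_take_full, hf1', hf2']
  · have hrc0 : pvLeftCountA r.reverse o.reverse ≠ 0 := by
      have := LC_pos r.reverse o.reverse (by simpa using hrne) (by simpa using hone)
        (by rw [headD_rev, headD_rev]; simpa using ht)
      omega
    simp only [hh, ht, Bool.false_and, Bool.false_eq_true, if_false,
      delIdxs_range, hf2, List.length_range, hrev1, hrev2]
    simp [hh, hrc0, hcast_r, hcast_o, PySem.List.slice_natCast, hrev1, hrev2, hf1', hf2']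
  · simp only [hh, ht, Bool.false_and, Bool.false_eq_true, if_false]
    simp [hh, ht, hofr, hofo]

-- ===== VERDICT (by name: the statement is the Claim_ definition above) =====
theorem adjust_protein_position_and_alleles_spec : Claim_equal_adjust_protein_position_and_alleles := by
  intro seq ps pe ra oa _ _
  unfold Spec_adjust_protein_position_and_alleles
  unfold adjust_protein_position_and_alleles adjust_protein_position_and_alleles_alt
  by_cases h : (ra == oa) = true
  · simp [h]
  · simp only [h, if_neg, Bool.false_eq_true, if_false, midAB, tailAB]
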